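-- pv_equiv track=rewrite | github.com/jimmybeckett/AdventOfCode2022 | solutions/8.py | horizontal_visible
-- ===== SOURCE A (Python) =====
-- import functools
--
-- def max_heights(lst):
--     return functools.reduce(lambda res, n: res + [max(n, res[-1]) if res else n], lst, [])
--
-- def horizontal_visible(trees):
--     visible = [[False] * len(trees[0]) for _ in trees]
--
--     for r in range(len(trees)):
--         l_heights, r_heights = [-1] + max_heights(trees[r])[:-1], list(reversed(max_heights(reversed(trees[r]))))[
--                                                                   1:] + [-1]
--         for c in range(len(trees[0])):
--             if trees[r][c] > l_heights[c] or trees[r][c] > r_heights[c]: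
--                 visible[r][c] = True
--     return visible
-- ===== SOURCE B (Python) =====
-- def horizontal_visible(trees):
--     width = len(trees[0])
--     return [
--         [row[c] > max(row[:c], default=-1) or row[c] > max(row[c + 1:], default=-1)
--          for c in range(width)]
--         for row in trees
--     ]
-- ===== Notes on version B (the rewrite author's own statement) =====
-- stated objective: simpler
-- what changed: Replaces the reduce-built left/right running-maximum arrays, the reversal bookkeeping and the index-based mutation of a preallocated boolean grid by the direct definition as one nested comprehension: a tree is visible iff it is taller than everything on one side, computed per cell as max(row[:c], default=-1) / max(row[c+1:], default=-1). Pre_ excludes the empty grid, where A returns [] only because its len(trees[0]) is never evaluated, while B reads the width first and raises.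
-- outside the precondition, e.g. on horizontal_visible([]): A returns [], B raises IndexError
import Mathlib
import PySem

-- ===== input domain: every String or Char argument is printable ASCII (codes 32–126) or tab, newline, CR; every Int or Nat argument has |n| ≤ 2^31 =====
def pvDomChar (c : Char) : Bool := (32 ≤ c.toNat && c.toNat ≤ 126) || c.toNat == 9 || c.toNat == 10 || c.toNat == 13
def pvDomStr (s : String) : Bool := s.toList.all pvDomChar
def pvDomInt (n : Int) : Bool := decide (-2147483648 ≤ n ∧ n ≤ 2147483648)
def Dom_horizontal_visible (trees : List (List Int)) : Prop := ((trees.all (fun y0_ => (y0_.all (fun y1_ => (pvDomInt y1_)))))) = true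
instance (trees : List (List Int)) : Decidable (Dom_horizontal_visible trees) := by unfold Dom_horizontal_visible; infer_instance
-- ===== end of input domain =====

-- B states the visibility condition directly per cell (taller than everything on one side,
-- -1 when that side is empty) instead of A's reduce-built running-maximum arrays: simpler.

-- ===== PORT A =====
-- functools.reduce(lambda res, n: res + [max(n, res[-1]) if res else n], lst, [])
def max_heights (lst : List Int) : List Int :=
  lst.foldl (fun res n =>
    res ++ [match res.getLast? with   -- `if res` / res[-1]: last element when nonempty
            | some l => max n l
            | none => n]) []

-- indexing trees[r], trees[r][c], l_heights[c], r_heights[c] is always in range on Pre_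
-- (outside Pre_ Python raises); getD supplies an irrelevant default there.
def horizontal_visible (trees : List (List Int)) : List (List Bool) :=
  let w0 := (trees.headD []).length            -- len(trees[0]); evaluated lazily in Python, [] excluded by Pre_
  let visible0 := trees.map (fun _ => List.replicate w0 false)
  (List.range trees.length).foldl (fun visible r =>
    let row := trees.getD r []
    let l_heights := (-1 : Int) :: (max_heights row).dropLast
    let r_heights := ((max_heights row.reverse).reverse.drop 1) ++ [(-1 : Int)]
    (List.range w0).foldl (fun visible c =>
      if decide (row.getD c 0 > l_heights.getD c 0) || decide (row.getD c 0 > r_heights.getD c 0) then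
        visible.modify r (fun rv => rv.set c true)   -- visible[r][c] = True
      else visible) visible) visible0

-- ===== PORT B =====
-- row[c] is in range on Pre_ (getD's default irrelevant); row[:c] / row[c+1:] with c : Nat are
-- List.take / List.drop (PySem.List.slice_to_natCast / slice_from_natCast);
-- max(l, default=-1) is PySem.List.maxD l id (-1).
def horizontal_visible_alt (trees : List (List Int)) : List (List Bool) :=
  let width := (trees.headD []).length         -- len(trees[0])
  trees.map (fun row =>
    (List.range width).map (fun c =>
      decide (row.getD c 0 > PySem.List.maxD (row.take c) (fun t => t) (-1))
        || decide (row.getD c 0 > PySem.List.maxD (row.drop (c + 1)) (fun t => t) (-1))))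

-- ===== PRECONDITION & SPEC =====
-- Pre_ is A's return domain minus the empty grid: a row shorter than len(trees[0]) makes A
-- raise IndexError at trees[r][c]; on trees = [] A happens to return [] only because its
-- len(trees[0]) is never evaluated, while B reads the grid width first and raises there.
def Pre_horizontal_visible (trees : List (List Int)) : Prop :=
  trees ≠ [] ∧ ∀ row ∈ trees, (trees.headD []).length ≤ row.length
instance (trees : List (List Int)) : Decidable (Pre_horizontal_visible trees) := by
  unfold Pre_horizontal_visible; infer_instance
def pvWitness_horizontal_visible : List (List Int) := [[3, 0, 3], [2, 5, 1], [6, 5, 3]]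

def Spec_horizontal_visible (trees : List (List Int)) (out : List (List Bool)) : Prop := out = horizontal_visible_alt trees
instance (trees : List (List Int)) (out : List (List Bool)) : Decidable (Spec_horizontal_visible trees out) := by unfold Spec_horizontal_visible; infer_instance

-- ===== CLAIM (what is proved, stated in full; the proofs are below) =====
def Claim_equal_horizontal_visible : Prop := ∀ (trees : List (List Int)), Dom_horizontal_visible trees → Pre_horizontal_visible trees → Spec_horizontal_visible trees (horizontal_visible trees)

-- ===== LEMMAS AND PROOFS =====

-- max(l, default=-1) written as a match, for the inductions
def runmax : List Int → Int
  | [] => -1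
  | x :: xs => xs.foldl max x

theorem maxD_eq_runmax (l : List Int) :
    PySem.List.maxD l (fun t => t) (-1) = runmax l := by
  cases l with
  | nil => rfl
  | cons x xs => simp [PySem.List.maxD, PySem.List.max?_id_cons, runmax]

theorem foldl_max_swap (l : List Int) (a b : Int) :
    l.foldl max (max a b) = max a (l.foldl max b) := by
  induction l generalizing b with
  | nil => rfl
  | cons c cs ih =>
    simp only [List.foldl_cons]
    rw [max_assoc, ih (max b c)]

theorem runmax_reverse (l : List Int) : runmax l.reverse = runmax l := by
  induction l with
  | nil => rfl
  | cons x xs ih =>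
    cases xs with
    | nil => rfl
    | cons y ys =>
      have h1 : runmax ((y :: ys).reverse ++ [x]) = max (runmax (y :: ys).reverse) x := by
        cases hrev : (y :: ys).reverse with
        | nil => simp at hrev
        | cons z t => simp [runmax, List.foldl_append]
      rw [List.reverse_cons, h1, ih]
      show max (runmax (y :: ys)) x = runmax (x :: y :: ys)
      simp only [runmax, List.foldl_cons]
      rw [max_comm, foldl_max_swap]

-- prefix maxima continuing from a seed m
def pmax : Int → List Int → List Int
  | _, [] => []
  | m, x :: xs => max m x :: pmax (max m x) xs

theorem length_pmax (m : Int) (xs : List Int) : (pmax m xs).length = xs.length := by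
  induction xs generalizing m with
  | nil => rfl
  | cons x xs ih => simp [pmax, ih]

theorem max_heights_foldl_aux (xs : List Int) (acc : List Int) (m : Int)
    (h : acc.getLast? = some m) :
    xs.foldl (fun res n =>
      res ++ [match res.getLast? with
              | some l => max n l
              | none => n]) acc = acc ++ pmax m xs := by
  induction xs generalizing acc m with
  | nil => simp [pmax]
  | cons x xs ih =>
    simp only [List.foldl_cons, h]
    rw [ih (acc ++ [max x m]) (max x m) List.getLast?_concat]
    simp [pmax, max_comm x m]

theorem max_heights_cons (x : Int) (xs : List Int) :
    max_heights (x :: xs) = x :: pmax x xs := by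
  unfold max_heights
  simp only [List.foldl_cons, List.getLast?_nil, List.nil_append]
  exact max_heights_foldl_aux xs [x] x rfl

theorem length_max_heights (xs : List Int) : (max_heights xs).length = xs.length := by
  cases xs with
  | nil => rfl
  | cons x xs => simp [max_heights_cons, length_pmax]

theorem pmax_getLast? (xs : List Int) (x : Int) :
    (x :: pmax x xs).getLast? = some (xs.foldl max x) := by
  induction xs generalizing x with
  | nil => rfl
  | cons y ys ih =>
    show (x :: max x y :: pmax (max x y) ys).getLast? = _
    rw [List.getLast?_cons_cons, ih (max x y)]
    rfl

theorem getLast?_max_heights (l : List Int) (h : l ≠ []) :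
    (max_heights l).getLast? = some (runmax l) := by
  cases l with
  | nil => exact absurd rfl h
  | cons x xs => rw [max_heights_cons, pmax_getLast?]; rfl

theorem max_heights_append_singleton (l : List Int) (x : Int) (h : l ≠ []) :
    max_heights (l ++ [x]) = max_heights l ++ [max x (runmax l)] := by
  unfold max_heights
  rw [List.foldl_append]
  show (fun res n =>
      res ++ [match res.getLast? with
              | some l => max n l
              | none => n]) (max_heights l) x = _
  simp only [getLast?_max_heights l h]
  rfl

-- the left/right "height to beat" lists exactly as A computes them
def lhList (row : List Int) : List Int := (-1 : Int) :: (max_heights row).dropLast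
def rhList (row : List Int) : List Int :=
  ((max_heights row.reverse).reverse.drop 1) ++ [(-1 : Int)]

theorem rhList_cons (x : Int) (xs : List Int) (h : xs ≠ []) :
    rhList (x :: xs) = runmax xs :: rhList xs := by
  have hrev : xs.reverse ≠ [] := by simpa using h
  have hM : max_heights xs.reverse ≠ [] := by
    intro hc
    have := length_max_heights xs.reverse
    rw [hc] at this
    exact hrev (List.length_eq_zero_iff.mp this.symm)
  have h1 : rhList (x :: xs) = (max_heights xs.reverse).reverse ++ [(-1 : Int)] := by
    unfold rhList
    rw [List.reverse_cons, max_heights_append_singleton xs.reverse x hrev,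
        List.reverse_append]
    simp
  have hhead : (max_heights xs.reverse).reverse.head? = some (runmax xs) := by
    rw [List.head?_reverse, getLast?_max_heights xs.reverse hrev, runmax_reverse]
  have h2 : (max_heights xs.reverse).reverse
      = runmax xs :: (max_heights xs.reverse).reverse.tail :=
    (List.cons_head?_tail hhead).symm
  rw [h1, h2]
  unfold rhList
  rw [List.drop_one]
  rfl

theorem rhList_single (x : Int) : rhList [x] = [(-1 : Int)] := by
  simp [rhList, max_heights]

-- (x :: pmax x xs).getD c 0 is the max of the first c+1 elements of x :: xs
theorem getD_cons_pmax (xs : List Int) (x : Int) (c : Nat) (h : c ≤ xs.length) :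
    (x :: pmax x xs).getD c 0 = (xs.take c).foldl max x := by
  induction xs generalizing x c with
  | nil =>
    have : c = 0 := by simpa using h
    subst this
    rfl
  | cons y ys ih =>
    cases c with
    | zero => rfl
    | succ c =>
      show (pmax x (y :: ys)).getD c 0 = _
      simp only [pmax]
      have := ih (max x y) c (by simpa using h)
      rw [show (max x y :: pmax (max x y) ys).getD c 0 = _ from this]
      simp [List.foldl_cons]

theorem lh_eq (row : List Int) (c : Nat) (h : c < row.length) :
    (lhList row).getD c 0 = runmax (row.take c) := by
  cases row with
  | nil => simp at h
  | cons x xs =>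
    cases c with
    | zero => rfl
    | succ c =>
      have hc : c < xs.length := by simpa using h
      show ((-1 : Int) :: (max_heights (x :: xs)).dropLast).getD (c + 1) 0 = _
      rw [max_heights_cons]
      have hlen : c < ((x :: pmax x xs).dropLast).length := by
        simp [length_pmax]; omega
      rw [show ((-1 : Int) :: (x :: pmax x xs).dropLast).getD (c + 1) 0
            = ((x :: pmax x xs).dropLast).getD c 0 from rfl,
          List.getD_eq_getElem _ 0 hlen, List.getElem_dropLast,
          ← List.getD_eq_getElem _ 0, getD_cons_pmax xs x c (le_of_lt hc),
          List.take_succ_cons]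
      rfl

theorem rh_eq (row : List Int) (c : Nat) (h : c < row.length) :
    (rhList row).getD c 0 = runmax (row.drop (c + 1)) := by
  induction row generalizing c with
  | nil => simp at h
  | cons x xs ih =>
    cases hxs : xs with
    | nil =>
      have : c = 0 := by subst hxs; simpa using h
      subst this; subst hxs
      rw [rhList_single]
      rfl
    | cons y ys =>
      rw [← hxs, rhList_cons x xs (by simp [hxs])]
      cases c with
      | zero => rfl
      | succ c =>
        show (rhList xs).getD c 0 = runmax (xs.drop (c + 1))
        exact ih c (by simpa using h)

-- what each output row is, pointwise (A's form)
def rowA (w0 : Nat) (row : List Int) : List Bool :=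
  (List.range w0).map (fun c =>
    decide (row.getD c 0 > (lhList row).getD c 0) || decide (row.getD c 0 > (rhList row).getD c 0))

-- the inner set-true-if fold acts pointwise
theorem foldl_set_getElem? (q : Nat → Bool) (cs : List Nat) (v : List Bool) (i : Nat) :
    (cs.foldl (fun v c => if q c then v.set c true else v) v)[i]?
      = (v[i]?).map (fun b => if cs.contains i && q i then true else b) := by
  induction cs generalizing v with
  | nil => simp
  | cons c cs ih =>
    simp only [List.foldl_cons]
    rw [ih]
    by_cases hc : c = i
    · subst hc
      by_cases hq : q c
      · simp only [if_pos hq, List.getElem?_set]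
        by_cases hlt : c < v.length
        · simp [hq, hlt]
        · simp [hq, hlt]
      · simp [hq]
    · have hci : i ≠ c := fun h => hc h.symm
      by_cases hq : q c
      · simp only [if_pos hq, List.getElem?_set, if_neg hc]
        simp [hci]
      · simp [hq, hci]

theorem foldl_set_range (q : Nat → Bool) (n : Nat) :
    ((List.range n).foldl (fun v c => if q c then v.set c true else v) (List.replicate n false))
      = (List.range n).map q := by
  apply List.ext_getElem?
  intro i
  rw [foldl_set_getElem?]
  by_cases h : i < n
  · have h1 : (List.replicate n false)[i]? = some false := by simp [h]
    have h2 : (List.range n)[i]? = some i := List.getElem?_range h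
    rw [h1, List.getElem?_map, h2]
    cases hq : q i <;> simp [List.mem_range, h, hq]
  · have h1 : (List.replicate n false)[i]? = none := List.getElem?_eq_none (by simpa using h)
    have h2 : (List.range n)[i]? = none := List.getElem?_eq_none (by simpa using h)
    rw [h1, List.getElem?_map, h2]
    rfl

-- the inner fold over `visible` only touches row r
theorem foldl_modify_set (q : Nat → Bool) (cs : List Nat) (r : Nat) (V : List (List Bool)) :
    cs.foldl (fun V c => if q c then V.modify r (fun rv => rv.set c true) else V) V
      = V.modify r (fun rv => cs.foldl (fun rv c => if q c then rv.set c true else rv) rv) := by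
  induction cs generalizing V with
  | nil =>
    simp only [List.foldl_nil]
    rw [show (fun rv : List Bool => rv) = id from rfl, List.modify_id]
  | cons c cs ih =>
    simp only [List.foldl_cons]
    by_cases hq : q c
    · simp only [if_pos hq]
      rw [ih]
      apply List.ext_getElem?
      intro j
      simp only [List.getElem?_modify]
      cases V[j]? <;> by_cases hr : r = j <;> simp [hr]
    · simp [hq, ih]

-- the outer fold: row i of the result is g i applied to row i of the start
theorem foldl_range_modify (g : Nat → List Bool → List Bool) (n : Nat)
    (V : List (List Bool)) (i : Nat) :
    ((List.range n).foldl (fun V r => V.modify r (g r)) V)[i]?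
      = if i < n then (V[i]?).map (g i) else V[i]? := by
  induction n with
  | zero => simp
  | succ n ih =>
    rw [List.range_succ, List.foldl_append]
    simp only [List.foldl_cons, List.foldl_nil, List.getElem?_modify, ih]
    by_cases hi : i < n
    · cases V[i]? <;> simp [hi, Nat.lt_succ_of_lt hi, Nat.ne_of_gt hi]
    · by_cases hie : n = i
      · subst hie
        cases V[n]? <;> simp
      · have : ¬ i < n + 1 := by omega
        simp [hi, this, hie]

-- A computes trees.map (rowA w0)
theorem horizontal_visible_eq_map (trees : List (List Int)) :
    horizontal_visible trees
      = trees.map (fun row => rowA (trees.headD []).length row) := by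
  unfold horizontal_visible
  simp only []
  apply List.ext_getElem?
  intro i
  rw [show (fun (visible : List (List Bool)) r =>
        (List.range (trees.headD []).length).foldl
          (fun visible c =>
            if decide ((trees.getD r []).getD c 0 > ((-1 : Int) :: (max_heights (trees.getD r [])).dropLast).getD c 0)
               || decide ((trees.getD r []).getD c 0 > (((max_heights (trees.getD r []).reverse).reverse.drop 1) ++ [(-1 : Int)]).getD c 0)
            then visible.modify r (fun rv => rv.set c true) else visible) visible)
      = (fun (visible : List (List Bool)) r => visible.modify r
          (fun rv => (List.range (trees.headD []).length).foldl
            (fun rv c =>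
              if decide ((trees.getD r []).getD c 0 > (lhList (trees.getD r [])).getD c 0)
                 || decide ((trees.getD r []).getD c 0 > (rhList (trees.getD r [])).getD c 0)
              then rv.set c true else rv) rv))
    from by funext V r; exact foldl_modify_set _ _ r V]
  rw [foldl_range_modify]
  by_cases hi : i < trees.length
  · simp only [hi, if_pos]
    rw [List.getElem?_map, List.getElem?_eq_getElem (by simpa using hi), List.getElem?_map,
        List.getElem?_eq_getElem hi]
    simp only [Option.map_some]
    congr 1
    rw [show trees.getD i [] = trees[i] from List.getD_eq_getElem trees [] hi,
        foldl_set_range]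
    rfl
  · have h1 : (trees.map (fun _ => List.replicate (trees.headD []).length false))[i]? = none :=
      List.getElem?_eq_none (by simpa using hi)
    have h2 : (trees.map (fun row => rowA (trees.headD []).length row))[i]? = none :=
      List.getElem?_eq_none (by simpa using hi)
    rw [h1, h2]
    simp [hi]

-- B's row equals rowA when the row is at least w0 wide
theorem alt_row_eq (w0 : Nat) (row : List Int) (hw : w0 ≤ row.length) :
    ((List.range w0).map (fun c =>
      decide (row.getD c 0 > PySem.List.maxD (row.take c) (fun t => t) (-1))
        || decide (row.getD c 0 > PySem.List.maxD (row.drop (c + 1)) (fun t => t) (-1))))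
      = rowA w0 row := by
  unfold rowA
  apply List.map_congr_left
  intro c hc
  have hcw : c < w0 := List.mem_range.mp hc
  have hcr : c < row.length := lt_of_lt_of_le hcw hw
  rw [maxD_eq_runmax, maxD_eq_runmax, lh_eq row c hcr, rh_eq row c hcr]

-- ===== VERDICT (by name: the statement is the Claim_ definition above) =====
theorem horizontal_visible_spec : Claim_equal_horizontal_visible := by
  intro trees _ hpre
  unfold Spec_horizontal_visible
  rw [horizontal_visible_eq_map]
  unfold horizontal_visible_alt
  simp only []
  apply List.map_congr_left
  intro row hrow
  exact (alt_row_eq _ row (hpre.2 row hrow)).symm
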